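-- pv_equiv track=rewrite | github.com/SOWMYA-KENCHE/Legal_assistant | flask_server.py | get_answer_source
-- ===== SOURCE A (Python) =====
-- from typing import Optional, Dict, Any, List, Tuple
--
-- def get_answer_source(chat_history: List[Dict[str, Any]]) -> str:
--     used_local_rag = False
--     used_kanoon = False
--     used_web = False
--
--     if not chat_history:
--         return "General Knowledge"
--
--     for msg in chat_history:
--         content = str(msg.get("content", ""))
--         if "retrieve_legal_context" in content:
--             used_local_rag = True
--         if "search_indiankanoon_api" in content:
--             used_kanoon = True
--         if "search_web" in content:
--             used_web = True
--
--     sources = []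
--     if used_local_rag:
--         sources.append("Uploaded Document")
--     if used_kanoon:
--         sources.append("Indian Kanoon")
--     if used_web:
--         sources.append("Web Search")
--
--     return " & ".join(sources) if sources else "General Knowledge"
-- ===== SOURCE B (Python) =====
-- SOURCE_TABLE = [
--     "General Knowledge",                                # 0b000
--     "Uploaded Document",                                # 0b001
--     "Indian Kanoon",                                    # 0b010
--     "Uploaded Document & Indian Kanoon",                # 0b011
--     "Web Search",                                       # 0b100
--     "Uploaded Document & Web Search",                   # 0b101
--     "Indian Kanoon & Web Search",                       # 0b110
--     "Uploaded Document & Indian Kanoon & Web Search",   # 0b111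
-- ]
--
-- def get_answer_source(chat_history):
--     # One combined text (newline separator cannot occur inside a keyword,
--     # so no spurious cross-message match), then a bitmask into a fixed table.
--     combined = "\n".join(str(m.get("content", "")) for m in chat_history)
--     mask = ((1 if "retrieve_legal_context" in combined else 0)
--             + (2 if "search_indiankanoon_api" in combined else 0)
--             + (4 if "search_web" in combined else 0))
--     return SOURCE_TABLE[mask]
-- ===== Notes on version B (the rewrite author's own statement) =====
-- stated objective: alternative
-- what changed: B joins all message contents into one newline-separated string, does each keyword test once on that combined text, and maps the resulting 3-bit mask through a precomputed 8-entry answer table, replacing A's per-message flag loop, append if-chain and ' & '.join.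
import Mathlib
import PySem

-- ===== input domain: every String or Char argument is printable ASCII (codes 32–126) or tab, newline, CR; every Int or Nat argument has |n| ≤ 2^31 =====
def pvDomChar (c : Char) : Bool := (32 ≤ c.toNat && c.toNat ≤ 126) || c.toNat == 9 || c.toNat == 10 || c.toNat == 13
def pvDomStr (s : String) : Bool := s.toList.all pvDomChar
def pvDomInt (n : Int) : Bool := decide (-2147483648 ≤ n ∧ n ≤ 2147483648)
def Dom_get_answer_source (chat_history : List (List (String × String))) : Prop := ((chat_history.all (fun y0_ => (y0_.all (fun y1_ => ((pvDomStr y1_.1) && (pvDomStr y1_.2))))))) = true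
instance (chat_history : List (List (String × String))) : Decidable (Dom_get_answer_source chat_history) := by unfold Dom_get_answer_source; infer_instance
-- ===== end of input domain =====

-- B joins all contents into one newline-separated string, tests each keyword once on it, and maps the 3-bit mask through a fixed 8-entry table (alternative decomposition; return value only).

-- ===== PORT A =====
def get_answer_source (chat_history : List (List (String × String))) : String :=
  if chat_history = [] then "General Knowledge"
  else
    let st := chat_history.foldl
      (fun (st : Bool × Bool × Bool) msg =>
        let content := PySem.Dict.getD ⟨msg⟩ "content" ""
        let r := if PySem.Str.isIn "retrieve_legal_context" content then true else st.1
        let k := if PySem.Str.isIn "search_indiankanoon_api" content then true else st.2.1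
        let w := if PySem.Str.isIn "search_web" content then true else st.2.2
        (r, k, w)) (false, false, false)
    let sources :=
      (if st.1 then ["Uploaded Document"] else []) ++
      (if st.2.1 then ["Indian Kanoon"] else []) ++
      (if st.2.2 then ["Web Search"] else [])
    if sources ≠ [] then PySem.Str.join " & " sources else "General Knowledge"

-- ===== PORT B =====
def pvSourceTable : List String :=
  ["General Knowledge",
   "Uploaded Document",
   "Indian Kanoon",
   "Uploaded Document & Indian Kanoon",
   "Web Search",
   "Uploaded Document & Web Search",
   "Indian Kanoon & Web Search",
   "Uploaded Document & Indian Kanoon & Web Search"]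

def get_answer_source_alt (chat_history : List (List (String × String))) : String :=
  let combined := PySem.Str.join "\n"
    (chat_history.map (fun m => PySem.Dict.getD ⟨m⟩ "content" ""))
  let mask : Nat :=
    (if PySem.Str.isIn "retrieve_legal_context" combined then 1 else 0)
    + (if PySem.Str.isIn "search_indiankanoon_api" combined then 2 else 0)
    + (if PySem.Str.isIn "search_web" combined then 4 else 0)
  pvSourceTable.getD mask "General Knowledge"

-- ===== PRECONDITION & SPEC =====
def Spec_get_answer_source (chat_history : List (List (String × String))) (out : String) : Prop := out = get_answer_source_alt chat_history
instance (chat_history : List (List (String × String))) (out : String) : Decidable (Spec_get_answer_source chat_history out) := by unfold Spec_get_answer_source; infer_instance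

-- ===== CLAIM (what is proved, stated in full; the proofs are below) =====
def Claim_equal_get_answer_source : Prop := ∀ (chat_history : List (List (String × String))), Dom_get_answer_source chat_history → Spec_get_answer_source chat_history (get_answer_source chat_history)

-- ===== LEMMAS AND PROOFS =====

-- A separator character absent from kw cannot be crossed by a prefix.
lemma prefix_sep {c : Char} {kw : List Char} (hc : c ∉ kw) :
    ∀ as bs : List Char, (kw <+: as ++ c :: bs ↔ kw <+: as) := by
  induction kw with
  | nil => intro as bs; simp
  | cons k kt ih =>
      intro as bs
      have hk : k ≠ c := fun h => hc (h ▸ List.mem_cons_self)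
      have hct : c ∉ kt := fun h => hc (List.mem_cons_of_mem _ h)
      cases as with
      | nil => simp [List.cons_prefix_cons, hk]
      | cons a at_ => simp [List.cons_prefix_cons, ih hct at_ bs]

-- kw without the separator char is infix of as ++ c :: bs iff it is infix of a side.
lemma infix_sep {c : Char} {kw : List Char} (hc : c ∉ kw) (hne : kw ≠ []) :
    ∀ as bs : List Char, (kw <:+: as ++ c :: bs ↔ kw <:+: as ∨ kw <:+: bs) := by
  intro as bs
  induction as with
  | nil =>
      simp only [List.nil_append]
      rw [List.infix_cons_iff]
      constructor
      · rintro (h | h)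
        · exact absurd ((prefix_sep hc [] bs).mp h) (by simpa using hne)
        · exact Or.inr h
      · rintro (h | h)
        · exact absurd (List.eq_nil_of_infix_nil h) hne
        · exact Or.inr h
  | cons a at_ ih =>
      rw [List.cons_append, List.infix_cons_iff, List.infix_cons_iff, ih]
      constructor
      · rintro (h | h | h)
        · exact Or.inl (Or.inl ((prefix_sep hc (a :: at_) bs).mp h))
        · exact Or.inl (Or.inr h)
        · exact Or.inr h
      · rintro ((h | h) | h)
        · exact Or.inl (h.trans (List.prefix_append _ _))
        · exact Or.inr (Or.inl h)
        · exact Or.inr (Or.inr h)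

-- one separator step: membership in p ++ '\\n' :: J splits.
lemma isIn_append_sep (kw p J : List Char) (hc : ('\n' : Char) ∉ kw) (hne : kw ≠ []) :
    PySem.Chars.isIn kw (p ++ '\n' :: J)
      = (PySem.Chars.isIn kw p || PySem.Chars.isIn kw J) := by
  by_cases hm : kw <:+: p ++ '\n' :: J
  · rcases (infix_sep hc hne p J).mp hm with h' | h'
    · rw [show PySem.Chars.isIn kw (p ++ '\n' :: J) = true from (PySem.Chars.isIn_iff_infix _ _).mpr hm,
          show PySem.Chars.isIn kw p = true from (PySem.Chars.isIn_iff_infix _ _).mpr h']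
      simp
    · rw [show PySem.Chars.isIn kw (p ++ '\n' :: J) = true from (PySem.Chars.isIn_iff_infix _ _).mpr hm,
          show PySem.Chars.isIn kw J = true from (PySem.Chars.isIn_iff_infix _ _).mpr h']
      simp
  · rw [show PySem.Chars.isIn kw (p ++ '\n' :: J) = false from (PySem.Chars.isIn_eq_false_iff _ _).mpr hm,
        show PySem.Chars.isIn kw p = false from
          (PySem.Chars.isIn_eq_false_iff _ _).mpr (fun h => hm ((infix_sep hc hne p J).mpr (Or.inl h))),
        show PySem.Chars.isIn kw J = false from
          (PySem.Chars.isIn_eq_false_iff _ _).mpr (fun h => hm ((infix_sep hc hne p J).mpr (Or.inr h)))]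
    rfl

-- keyword membership in the '\n'-joined text = membership in some part.
lemma isIn_join (kw : List Char) (hc : ('\n' : Char) ∉ kw) (hne : kw ≠ []) :
    ∀ parts : List (List Char),
      PySem.Chars.isIn kw (PySem.Chars.join ['\n'] parts)
        = parts.any (fun p => PySem.Chars.isIn kw p) := by
  intro parts
  induction parts with
  | nil =>
      rw [PySem.Chars.join_nil, List.any_nil, PySem.Chars.isIn_eq_false_iff]
      intro h; exact hne (List.eq_nil_of_infix_nil h)
  | cons p t ih =>
      cases t with
      | nil => simp [PySem.Chars.join_singleton]
      | cons q r =>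
          rw [PySem.Chars.join_cons_cons, List.any_cons,
              show p ++ ['\n'] ++ PySem.Chars.join ['\n'] (q :: r)
                 = p ++ '\n' :: PySem.Chars.join ['\n'] (q :: r) by simp,
              isIn_append_sep kw p _ hc hne, ih]

-- A's flag loop computes exactly the three any-scans (flags only ever go from false to true).
lemma flags_eq (ch : List (List (String × String))) (a b c : Bool) :
    ch.foldl
      (fun (st : Bool × Bool × Bool) msg =>
        let content := PySem.Dict.getD ⟨msg⟩ "content" ""
        let r := if PySem.Str.isIn "retrieve_legal_context" content then true else st.1
        let k := if PySem.Str.isIn "search_indiankanoon_api" content then true else st.2.1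
        let w := if PySem.Str.isIn "search_web" content then true else st.2.2
        (r, k, w)) (a, b, c)
    = (a || ch.any (fun m => PySem.Str.isIn "retrieve_legal_context" (PySem.Dict.getD ⟨m⟩ "content" "")),
       b || ch.any (fun m => PySem.Str.isIn "search_indiankanoon_api" (PySem.Dict.getD ⟨m⟩ "content" "")),
       c || ch.any (fun m => PySem.Str.isIn "search_web" (PySem.Dict.getD ⟨m⟩ "content" ""))) := by
  induction ch generalizing a b c with
  | nil => simp
  | cons m t ih =>
      simp only [List.foldl_cons, List.any_cons, ih, Prod.mk.injEq]
      refine ⟨?_, ?_, ?_⟩ <;>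
        cases PySem.Str.isIn "retrieve_legal_context" (PySem.Dict.getD ⟨m⟩ "content" "") <;>
        cases PySem.Str.isIn "search_indiankanoon_api" (PySem.Dict.getD ⟨m⟩ "content" "") <;>
        cases PySem.Str.isIn "search_web" (PySem.Dict.getD ⟨m⟩ "content" "") <;>
        simp

-- B's combined-text test for one keyword equals the per-message any-scan.
lemma isIn_combined (kw : String) (hc : ('\n' : Char) ∉ kw.toList) (hne : kw.toList ≠ [])
    (ch : List (List (String × String))) :
    PySem.Str.isIn kw
      (PySem.Str.join "\n" (ch.map (fun m => PySem.Dict.getD ⟨m⟩ "content" "")))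
    = ch.any (fun m => PySem.Str.isIn kw (PySem.Dict.getD ⟨m⟩ "content" "")) := by
  simp only [PySem.Str.isIn_eq, PySem.Str.toList_join]
  rw [show ("\n" : String).toList = ['\n'] from rfl, isIn_join kw.toList hc hne]
  simp [List.any_map, Function.comp_def]

-- ===== VERDICT (by name: the statement is the Claim_ definition above) =====
theorem get_answer_source_spec : Claim_equal_get_answer_source := by
  intro ch _
  unfold Spec_get_answer_source get_answer_source get_answer_source_alt pvSourceTable
  simp only [isIn_combined "retrieve_legal_context" (by decide) (by decide),
      isIn_combined "search_indiankanoon_api" (by decide) (by decide),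
      isIn_combined "search_web" (by decide) (by decide)]
  by_cases h : ch = []
  · subst h; decide
  · rw [if_neg h]
    cases h1 : ch.any (fun m => PySem.Str.isIn "retrieve_legal_context" (PySem.Dict.getD ⟨m⟩ "content" "")) <;>
    cases h2 : ch.any (fun m => PySem.Str.isIn "search_indiankanoon_api" (PySem.Dict.getD ⟨m⟩ "content" "")) <;>
    cases h3 : ch.any (fun m => PySem.Str.isIn "search_web" (PySem.Dict.getD ⟨m⟩ "content" "")) <;>
      simp only [flags_eq, Bool.false_or, h1, h2, h3] <;> decide
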